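-- pv_equiv track=rewrite | github.com/JaceIntanai/backend-exam-master-swift-dynamics | 3_number_to_thai/main.py | number_to_thai
-- ===== SOURCE A (Python) =====
-- def number_to_thai(number: int) -> str:
--     if number < 0:
--         return "number can not less than 0"
--     if number > 10000000:
--         return "number exceeds maximum limit"
--
--     list_thai_numerals = ["", "หนึ่ง", "สอง", "สาม", "สี่", "ห้า", "หก", "เจ็ด", "แปด", "เก้า"]
--     list_thai_units = ["", "สิบ", "ร้อย", "พัน", "หมื่น", "แสน", "ล้าน"]
--
--     if number == 0:
--         return "ศูนย์"
--
--     result = ""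
--     num_str = str(number)
--     length = len(num_str)
--
--     for i, digit in enumerate(num_str):
--         digit_str = int(digit)
--         position = length - i - 1
--
--         if digit_str == 0:
--             continue
--
--         if position == 0 and digit_str == 1 and length > 1:
--             result += "เอ็ด"
--         elif position == 1 and digit_str == 1:
--             result += "สิบ"
--         elif position == 1 and digit_str == 2:
--             result += "ยี่สิบ"
--         else:
--             result += list_thai_numerals[digit_str] + list_thai_units[position]
--
--     return result
-- ===== SOURCE B (Python) =====
-- def number_to_thai(number: int) -> str:
--     if number < 0:
--         return "number can not less than 0"
--     if number > 10000000:
--         return "number exceeds maximum limit"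
--     if number == 0:
--         return "ศูนย์"
--
--     numerals = ["", "หนึ่ง", "สอง", "สาม", "สี่", "ห้า", "หก", "เจ็ด", "แปด", "เก้า"]
--     units = ["", "สิบ", "ร้อย", "พัน", "หมื่น", "แสน", "ล้าน"]
--
--     length = len(str(number))
--     result = ""
--     n, position = number, 0
--     while n > 0:
--         n, d = divmod(n, 10)
--         if d != 0:
--             if position == 0 and d == 1 and length > 1:
--                 seg = "เอ็ด"
--             elif position == 1 and d == 1:
--                 seg = "สิบ"
--             elif position == 1 and d == 2:
--                 seg = "ยี่สิบ"
--             else: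
--                 seg = numerals[d] + units[position]
--             result = seg + result
--         position += 1
--     return result
-- ===== Notes on version B (the rewrite author's own statement) =====
-- stated objective: alternative
-- what changed: Replaces the string conversion + indexed left-to-right scan over str(number) with arithmetic digit extraction by divmod least-significant-first, prepending each segment, so no enumerate/position subtraction over characters is needed.
-- outside the precondition, e.g. on number_to_thai(10000000): A raises IndexError, B raises IndexError
import Mathlib
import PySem

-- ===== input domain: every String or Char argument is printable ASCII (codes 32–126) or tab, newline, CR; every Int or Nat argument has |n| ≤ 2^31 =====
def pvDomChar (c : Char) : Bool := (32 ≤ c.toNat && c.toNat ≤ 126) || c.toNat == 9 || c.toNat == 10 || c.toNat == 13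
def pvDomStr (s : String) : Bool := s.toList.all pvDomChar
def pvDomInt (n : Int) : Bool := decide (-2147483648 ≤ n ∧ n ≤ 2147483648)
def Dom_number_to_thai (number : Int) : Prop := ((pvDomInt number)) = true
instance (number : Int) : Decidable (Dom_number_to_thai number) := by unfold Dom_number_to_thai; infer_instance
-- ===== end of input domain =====

-- B replaces A's scan over str(number) with arithmetic divmod digit extraction (least-significant first,
-- prepending segments); same output, same cost — objective: alternative.


-- ===== PORT A =====
-- Transliteration of A. Strings are built as List Char and packed with String.mk at the end
-- (Lean's own String append is kernel-opaque). int(digit) is PySem.Int.ofChars? on the one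
-- character; it is always `some` here (the characters of str(number) are decimal digits), the
-- .getD 0 never fires. list[...] indexing is pyGetD; inside Pre_ the index is always in range
-- (Python would raise IndexError only at number = 10000000, excluded by Pre_).
def number_to_thai (number : Int) : String :=
  if number < 0 then "number can not less than 0"
  else if number > 10000000 then "number exceeds maximum limit"
  else
    let listThaiNumerals : List (List Char) :=
      [[], "หนึ่ง".toList, "สอง".toList, "สาม".toList, "สี่".toList, "ห้า".toList,
       "หก".toList, "เจ็ด".toList, "แปด".toList, "เก้า".toList]
    let listThaiUnits : List (List Char) :=
      [[], "สิบ".toList, "ร้อย".toList, "พัน".toList, "หมื่น".toList, "แสน".toList, "ล้าน".toList]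
    if number = 0 then "ศูนย์"
    else
      let numStr := PySem.Int.toChars number
      let length := PySem.List.len numStr
      String.mk ((PySem.List.enumerate numStr).foldl (fun result p =>
        let digitStr : Int := (PySem.Int.ofChars? [p.2]).getD 0
        let position : Int := length - p.1 - 1
        if digitStr = 0 then result
        else if position = 0 ∧ digitStr = 1 ∧ length > 1 then result ++ "เอ็ด".toList
        else if position = 1 ∧ digitStr = 1 then result ++ "สิบ".toList
        else if position = 1 ∧ digitStr = 2 then result ++ "ยี่สิบ".toList
        else result ++ PySem.List.pyGetD listThaiNumerals digitStr []
                    ++ PySem.List.pyGetD listThaiUnits position []) [])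

-- ===== PORT B =====
-- Transliteration of Source B. The while-loop becomes structural recursion on n (a Nat: the loop is
-- entered with n = number > 0, and Nat / and % agree with Python's divmod on nonnegatives).
def number_to_thai_altLoop (numerals units : List (List Char)) (length : Int) :
    Nat → Int → List Char → List Char
  | n, position, result =>
    if h : n = 0 then result
    else
      let d : Int := ((n % 10 : Nat) : Int)
      let result' :=
        if d = 0 then result
        else
          (if position = 0 ∧ d = 1 ∧ length > 1 then "เอ็ด".toList
           else if position = 1 ∧ d = 1 then "สิบ".toList
           else if position = 1 ∧ d = 2 then "ยี่สิบ".toList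
           else PySem.List.pyGetD numerals d [] ++ PySem.List.pyGetD units position []) ++ result
      number_to_thai_altLoop numerals units length (n / 10) (position + 1) result'
  termination_by n => n
  decreasing_by exact Nat.div_lt_self (Nat.pos_of_ne_zero h) (by omega)

def number_to_thai_alt (number : Int) : String :=
  if number < 0 then "number can not less than 0"
  else if number > 10000000 then "number exceeds maximum limit"
  else if number = 0 then "ศูนย์"
  else
    let numerals : List (List Char) :=
      [[], "หนึ่ง".toList, "สอง".toList, "สาม".toList, "สี่".toList, "ห้า".toList,
       "หก".toList, "เจ็ด".toList, "แปด".toList, "เก้า".toList]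
    let units : List (List Char) :=
      [[], "สิบ".toList, "ร้อย".toList, "พัน".toList, "หมื่น".toList, "แสน".toList, "ล้าน".toList]
    let length := PySem.List.len (PySem.Int.toChars number)
    String.mk (number_to_thai_altLoop numerals units length number.toNat 0 [])

-- ===== PRECONDITION & SPEC =====
-- Pre_ excludes only number = 10000000, the single input on which A raises IndexError
-- (list_thai_units[7]); B raises there as well.
def Pre_number_to_thai (number : Int) : Prop := number ≠ 10000000
instance (number : Int) : Decidable (Pre_number_to_thai number) := by
  unfold Pre_number_to_thai; infer_instance
def pvWitness_number_to_thai : Int := (21)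
def Spec_number_to_thai (number : Int) (out : String) : Prop := out = number_to_thai_alt number
instance (number : Int) (out : String) : Decidable (Spec_number_to_thai number out) := by
  unfold Spec_number_to_thai; infer_instance

-- ===== CLAIM (what is proved, stated in full; the proofs are below) =====
def Claim_equal_number_to_thai : Prop :=
  ∀ (number : Int), Dom_number_to_thai number → Pre_number_to_thai number →
    Spec_number_to_thai number (number_to_thai number)

-- ===== LEMMAS AND PROOFS =====

-- The digit-wise piece both programs emit for digit d at position pos (empty for d = 0).
def thaiPiece (numerals units : List (List Char)) (length pos d : Int) : List Char :=
  if d = 0 then []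
  else if pos = 0 ∧ d = 1 ∧ length > 1 then "เอ็ด".toList
  else if pos = 1 ∧ d = 1 then "สิบ".toList
  else if pos = 1 ∧ d = 2 then "ยี่สิบ".toList
  else PySem.List.pyGetD numerals d [] ++ PySem.List.pyGetD units pos []

-- Common shape: concatenation of the pieces of an LSD-first digit list, most significant first.
def thaiSpine (numerals units : List (List Char)) (length : Int) : List Nat → Int → List Char
  | [], _ => []
  | d :: L, pos => thaiSpine numerals units length L (pos + 1)
      ++ thaiPiece numerals units length pos ((d : Nat) : Int)

theorem altLoop_eq_spine (numerals units : List (List Char)) (length : Int) :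
    ∀ (n : Nat) (pos : Int) (result : List Char),
      number_to_thai_altLoop numerals units length n pos result
        = thaiSpine numerals units length (Nat.digits 10 n) pos ++ result := by
  intro n
  induction n using Nat.strong_induction_on with
  | _ n ih =>
    intro pos result
    rw [number_to_thai_altLoop]
    by_cases h : n = 0
    · simp [h, thaiSpine]
    · simp only [dif_neg h]
      rw [ih (n / 10) (Nat.div_lt_self (Nat.pos_of_ne_zero h) (by omega)),
          Nat.digits_def' (by omega : 1 < 10) (Nat.pos_of_ne_zero h)]
      simp only [thaiSpine, thaiPiece, List.append_assoc]
      congr 1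
      split_ifs <;> simp_all

theorem ofChars_digitChar (d : Nat) (hd : d < 10) :
    (PySem.Int.ofChars? [Nat.digitChar d]).getD 0 = (d : Int) := by
  interval_cases d <;> decide

theorem toDigitsCore_eq (f : Nat) :
    ∀ (n : Nat) (ds : List Char), 0 < n → n < f →
      Nat.toDigitsCore 10 f n ds = ((Nat.digits 10 n).map Nat.digitChar).reverse ++ ds := by
  induction f with
  | zero => intro n ds h1 h2; omega
  | succ f ih =>
    intro n ds h1 h2
    rw [Nat.toDigitsCore]
    rw [Nat.digits_def' (by omega : 1 < 10) h1]
    by_cases h : n / 10 = 0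
    · simp [h]
    · rw [if_neg h, ih (n / 10) _ (Nat.pos_of_ne_zero h)
          (lt_of_lt_of_le (Nat.div_lt_self h1 (by omega)) (by omega))]
      simp

theorem toChars_eq_digits (n : Int) (h0 : 0 < n) :
    PySem.Int.toChars n = ((Nat.digits 10 n.toNat).map Nat.digitChar).reverse := by
  have : ¬ n < 0 := by omega
  simp only [PySem.Int.toChars, if_neg this]
  rw [Nat.toDigits, toDigitsCore_eq (n.toNat + 1) n.toNat [] (by omega) (by omega)]
  simp

theorem foldA_eq_spine (numerals units : List (List Char)) (length : Int) :
    ∀ (L : List Nat) (s : Int) (result : List Char), (∀ d ∈ L, d < 10) →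
      (PySem.List.enumerate ((L.map Nat.digitChar).reverse) s).foldl
        (fun result p =>
          if (PySem.Int.ofChars? [p.2]).getD 0 = 0 then result
          else if length - p.1 - 1 = 0 ∧ (PySem.Int.ofChars? [p.2]).getD 0 = 1 ∧ length > 1 then
            result ++ "เอ็ด".toList
          else if length - p.1 - 1 = 1 ∧ (PySem.Int.ofChars? [p.2]).getD 0 = 1 then
            result ++ "สิบ".toList
          else if length - p.1 - 1 = 1 ∧ (PySem.Int.ofChars? [p.2]).getD 0 = 2 then
            result ++ "ยี่สิบ".toList
          else result ++ PySem.List.pyGetD numerals ((PySem.Int.ofChars? [p.2]).getD 0) []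
                      ++ PySem.List.pyGetD units (length - p.1 - 1) []) result
        = result ++ thaiSpine numerals units length L (length - s - L.length) := by
  intro L
  induction L with
  | nil => intro s result _; simp [thaiSpine]
  | cons d L ihL =>
    intro s result hlt
    have hd : d < 10 := hlt d (by simp)
    simp only [List.map_cons, List.reverse_cons]
    rw [PySem.List.enumerate_append, List.foldl_append,
        ihL s result (fun x hx => hlt x (by simp [hx]))]
    simp only [PySem.List.enumerate_cons, PySem.List.enumerate_nil, List.foldl_cons,
      List.foldl_nil, List.length_reverse, List.length_map]
    rw [ofChars_digitChar d hd]
    have hpos : length - (s + (L.length : Int)) - 1 = length - s - (d :: L).length := by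
      simp; ring
    simp only [thaiSpine, thaiPiece, hpos]
    have harg : length - s - ((d :: L).length : Int) + 1 = length - s - (L.length : Int) := by
      simp; ring
    rw [harg]
    split_ifs <;> simp_all

theorem number_to_thai_spec_aux (number : Int) (hlo : 0 < number) (hhi : number < 10000000) :
    number_to_thai number = number_to_thai_alt number := by
  have h1 : ¬ number < 0 := by omega
  have h2 : ¬ number > 10000000 := by omega
  have h3 : ¬ number = 0 := by omega
  have hm : 0 < number.toNat := by omega
  unfold number_to_thai number_to_thai_alt
  simp only [if_neg h1, if_neg h2, if_neg h3]
  rw [altLoop_eq_spine]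
  have hch := toChars_eq_digits number hlo
  have hlen : PySem.List.len (PySem.Int.toChars number)
      = ((Nat.digits 10 number.toNat).length : Int) := by
    rw [hch]; simp [PySem.List.len_eq]
  rw [hlen, hch, foldA_eq_spine _ _ _ _ 0 []
    (fun d hd => Nat.digits_lt_base (by omega) hd)]
  have hz : ((Nat.digits 10 number.toNat).length : Int) - 0
      - ((Nat.digits 10 number.toNat).length : Int) = 0 := by ring
  rw [List.nil_append, hz, List.append_nil]

-- ===== VERDICT (by name: the statement is the Claim_ definition above) =====
theorem number_to_thai_spec : Claim_equal_number_to_thai := by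
  intro number hdom hpre
  unfold Spec_number_to_thai
  by_cases h1 : number < 0
  · unfold number_to_thai number_to_thai_alt; rw [if_pos h1, if_pos h1]
  · by_cases h2 : number > 10000000
    · unfold number_to_thai number_to_thai_alt
      rw [if_neg h1, if_neg h1, if_pos h2, if_pos h2]
    · by_cases h3 : number = 0
      · unfold number_to_thai number_to_thai_alt
        simp [h3]
      · exact number_to_thai_spec_aux number (by omega)
          (by unfold Pre_number_to_thai at hpre; omega)
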